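-- pv_equiv track=rewrite | github.com/Fatimalbasha/python_projects | calculate_love_score.py | calculate_love_score
-- ===== SOURCE A (Python) =====
-- def calculate_love_score(name1, name2):
--     names_compine = name1.lower() + name2.lower()
--
--     true_count = 0
--     for char in names_compine:
--         if char in 'true':
--             true_count += 1
--
--
--     love_count = 0
--     for char in names_compine:
--         if char in 'love':
--             love_count += 1
--
--     love_score = str(true_count) + str(love_count)
--
--     return(love_score)
-- ===== SOURCE B (Python) =====
-- def calculate_love_score(name1, name2):
--     # two-phase: build a frequency table once, then aggregate over the target letters
--     freq = {}
--     for ch in (name1 + name2).lower():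
--         freq[ch] = freq.get(ch, 0) + 1
--     true_count = sum(freq.get(c, 0) for c in "true")
--     love_count = sum(freq.get(c, 0) for c in "love")
--     return str(true_count) + str(love_count)
-- ===== Notes on version B (the rewrite author's own statement) =====
-- stated objective: alternative
-- what changed: B builds a character-frequency dictionary in one pass and then sums table lookups over the fixed letter strings 'true' and 'love', instead of A's two full rescans of the combined name testing membership per character.
import Mathlib
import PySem

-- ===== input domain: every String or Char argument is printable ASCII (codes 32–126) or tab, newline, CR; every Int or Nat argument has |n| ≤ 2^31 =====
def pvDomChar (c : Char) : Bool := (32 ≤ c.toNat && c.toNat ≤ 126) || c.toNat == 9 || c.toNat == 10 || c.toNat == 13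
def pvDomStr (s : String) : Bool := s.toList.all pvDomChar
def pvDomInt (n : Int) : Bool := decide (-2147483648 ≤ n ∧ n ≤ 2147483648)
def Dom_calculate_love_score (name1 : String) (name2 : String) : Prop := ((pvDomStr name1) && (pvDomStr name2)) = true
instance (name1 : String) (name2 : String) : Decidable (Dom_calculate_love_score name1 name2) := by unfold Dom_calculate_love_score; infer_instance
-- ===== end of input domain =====

-- B replaces A's two membership-testing rescans of the combined name by one frequency-table
-- pass followed by lookup sums over the target letters 'true' / 'love' (alternative, same cost).


-- ===== PORT A =====
-- Python's `char in 'true'` for a single character is exactly list membership — ported as `c ∈ [...]` (exact).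
def calculate_love_score (name1 : String) (name2 : String) : String :=
  let names_compine : List Char :=
    PySem.Chars.lower name1.toList ++ PySem.Chars.lower name2.toList
  let true_count : Int :=
    names_compine.foldl (fun acc c => if ['t', 'r', 'u', 'e'].contains c then acc + 1 else acc) 0
  let love_count : Int :=
    names_compine.foldl (fun acc c => if ['l', 'o', 'v', 'e'].contains c then acc + 1 else acc) 0
  PySem.Int.toStr true_count ++ PySem.Int.toStr love_count

-- ===== PORT B =====
def calculate_love_score_alt (name1 : String) (name2 : String) : String :=
  let chars : List Char := PySem.Chars.lower (name1.toList ++ name2.toList)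
  let freq : PySem.Dict Char Int :=
    chars.foldl (fun d c => d.insert c (d.getD c 0 + 1)) PySem.Dict.empty
  let true_count : Int := (['t', 'r', 'u', 'e'].map (fun c => freq.getD c 0)).sum
  let love_count : Int := (['l', 'o', 'v', 'e'].map (fun c => freq.getD c 0)).sum
  PySem.Int.toStr true_count ++ PySem.Int.toStr love_count

-- ===== PRECONDITION & SPEC =====
def Spec_calculate_love_score (name1 : String) (name2 : String) (out : String) : Prop := out = calculate_love_score_alt name1 name2
instance (name1 : String) (name2 : String) (out : String) : Decidable (Spec_calculate_love_score name1 name2 out) := by unfold Spec_calculate_love_score; infer_instance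

-- ===== CLAIM (what is proved, stated in full; the proofs are below) =====
def Claim_equal_calculate_love_score : Prop := ∀ (name1 : String) (name2 : String), Dom_calculate_love_score name1 name2 → Spec_calculate_love_score name1 name2 (calculate_love_score name1 name2)

-- ===== LEMMAS AND PROOFS =====

-- counting membership in a 4-letter word with distinct letters = sum of the four per-letter counts
theorem countP_mem_four (a b c d : Char) (hab : a ≠ b) (hac : a ≠ c) (had : a ≠ d)
    (hbc : b ≠ c) (hbd : b ≠ d) (hcd : c ≠ d) (l : List Char) :
    l.countP (fun x => [a, b, c, d].contains x)
      = l.count a + l.count b + l.count c + l.count d := by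
  induction l with
  | nil => simp
  | cons x xs ih =>
    simp only [List.countP_cons, List.count_cons, ih]
    by_cases hxa : x = a
    · subst hxa; simp [hab, hac, had]; omega
    · by_cases hxb : x = b
      · subst hxb; simp [hxa, hbc, hbd]; omega
      · by_cases hxc : x = c
        · subst hxc; simp [hxa, hxb, hcd]; omega
        · by_cases hxd : x = d
          · subst hxd; simp [hxa, hxb, hxc]; omega
          · simp [hxa, hxb, hxc, hxd]

-- B's frequency-table lookup sum equals A's membership-counting fold, for one 4-letter word
theorem table_sum_eq_fold (a b c d : Char) (hab : a ≠ b) (hac : a ≠ c) (had : a ≠ d)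
    (hbc : b ≠ c) (hbd : b ≠ d) (hcd : c ≠ d) (l : List Char) :
    (([a, b, c, d]).map
        (fun v => (l.foldl (fun t x => t.insert x (t.getD x 0 + 1)) (PySem.Dict.empty : PySem.Dict Char Int)).getD v 0)).sum
      = l.foldl (fun acc x => if [a, b, c, d].contains x then acc + 1 else acc) 0 :=
  calc (([a, b, c, d]).map
        (fun v => (l.foldl (fun t x => t.insert x (t.getD x 0 + 1)) (PySem.Dict.empty : PySem.Dict Char Int)).getD v 0)).sum
      = 0 + ((l.countP (fun x => [a, b, c, d].contains x) : Int)) := by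
        rw [countP_mem_four a b c d hab hac had hbc hbd hcd]
        simp [PySem.Dict.getD_foldl_insert_add_one]
        ring
    _ = l.foldl (fun acc x => if [a, b, c, d].contains x then acc + 1 else acc) 0 :=
        (PySem.List.foldl_count_if (fun x => [a, b, c, d].contains x) l 0).symm

-- lowercasing maps characters pointwise, so it distributes over concatenation
theorem lower_append (s t : List Char) :
    PySem.Chars.lower (s ++ t) = PySem.Chars.lower s ++ PySem.Chars.lower t :=
  List.map_append ..

-- ===== VERDICT (by name: the statement is the Claim_ definition above) =====
theorem calculate_love_score_spec : Claim_equal_calculate_love_score := by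
  intro name1 name2 _
  show calculate_love_score name1 name2 = calculate_love_score_alt name1 name2
  unfold calculate_love_score calculate_love_score_alt
  dsimp only
  rw [lower_append,
    table_sum_eq_fold 't' 'r' 'u' 'e' (by decide) (by decide) (by decide) (by decide)
      (by decide) (by decide),
    table_sum_eq_fold 'l' 'o' 'v' 'e' (by decide) (by decide) (by decide) (by decide)
      (by decide) (by decide)]
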